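-- pv_equiv track=rewrite | github.com/ece-jacob-scott/advent-of-code | year-2021/day-4/main.py | find_solution_speed
-- ===== SOURCE A (Python) =====
-- from typing import List, Tuple
--
-- def find_solution_speed(board: Tuple[List[str], List[str], List[str]], draw: List[str]) -> int:
--     solution_array = [i for i in draw[0:5]]
--     solution_i = 5
--
--     while solution_i < len(draw):
--         for row in board[0]:
--             solution_temp = list(
--                 filter(lambda num: num in solution_array, row))
--             if len(solution_temp) == 5:
--                 return len(solution_array)
--
--         for col in board[1]:
--             solution_temp = list(
--                 filter(lambda num: num in solution_array, col))
--             if len(solution_temp) == 5: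
--                 return len(solution_array)
--
--         solution_array.append(draw[solution_i])
--         solution_i += 1
--     return -1
-- ===== SOURCE B (Python) =====
-- def find_solution_speed(board, draw):
--     # first index of each drawn value
--     pos = {}
--     for i, v in enumerate(draw):
--         if v not in pos:
--             pos[v] = i
--     best = -1
--     for line in board[0] + board[1]:
--         ps = sorted(pos[c] for c in line if c in pos)
--         if len(ps) < 5:
--             continue
--         k = max(5, ps[4] + 1)
--         if (len(ps) == 5 or k <= ps[5]) and k < len(draw):
--             if best == -1 or k < best:
--                 best = k
--     return best
-- ===== Notes on version B (the rewrite author's own statement) =====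
-- stated objective: faster
-- what changed: Instead of replaying the draw step by step and re-scanning every line against the growing prefix list, B builds a first-index map of the draw once, converts each line to its sorted character positions, reads off in closed form the first checked step at which that line has exactly five marked characters, and returns the minimum over lines.
import Mathlib
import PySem

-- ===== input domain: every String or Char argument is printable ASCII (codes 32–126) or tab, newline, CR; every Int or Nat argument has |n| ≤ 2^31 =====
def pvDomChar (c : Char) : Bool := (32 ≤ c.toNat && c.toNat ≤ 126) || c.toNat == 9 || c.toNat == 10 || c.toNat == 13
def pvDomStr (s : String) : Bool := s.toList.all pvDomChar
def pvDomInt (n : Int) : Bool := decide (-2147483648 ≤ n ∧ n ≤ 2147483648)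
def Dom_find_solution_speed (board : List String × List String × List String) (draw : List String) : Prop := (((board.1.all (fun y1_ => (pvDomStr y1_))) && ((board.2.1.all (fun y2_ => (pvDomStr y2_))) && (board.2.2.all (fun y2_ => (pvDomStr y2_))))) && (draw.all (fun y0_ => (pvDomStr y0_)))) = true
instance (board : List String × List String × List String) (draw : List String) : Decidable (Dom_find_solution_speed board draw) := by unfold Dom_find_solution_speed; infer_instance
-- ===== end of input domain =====

-- B replaces A's repeated prefix re-scans by one pass building each number's first draw index
-- and, per line, a sorted-positions closed form for its completion step (objective: faster).

-- ===== PORT A =====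
-- 'if len(filter(num in solution_array, line)) == 5' over a list of line strings
def fssCheck (lines : List String) (sol : List String) : Bool :=
  lines.any (fun line =>
    (line.toList.filter (fun c => sol.contains (String.ofList [c]))).length == 5)

-- the while loop: sol is solution_array, i is solution_i
def fssLoop (b0 b1 : List String) (draw : List String) (sol : List String) (i : Nat) : Int :=
  if i < draw.length then
    if fssCheck b0 sol then (sol.length : Int)
    else if fssCheck b1 sol then (sol.length : Int)
    else fssLoop b0 b1 draw (sol ++ [draw.getD i ""]) (i + 1)
  else -1
termination_by draw.length - i

def find_solution_speed (board : List String × List String × List String) (draw : List String) : Int :=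
  fssLoop board.1 board.2.1 draw (PySem.List.slice draw (some 0) (some 5)) 5

-- ===== PORT B =====
-- pos = first draw index of each value (one pass over enumerate(draw))
def fssPos (draw : List String) : PySem.Dict String Int :=
  (PySem.List.enumerate draw 0).foldl
    (fun d p => if d.contains p.2 then d else d.insert p.2 p.1) PySem.Dict.empty

-- per line: sorted first-indices of its chars; candidate completion step, or none
def fssLineK (pos : PySem.Dict String Int) (line : String) (n : Int) : Option Int :=
  let ps := PySem.List.sorted (line.toList.filterMap (fun c => pos.get? (String.ofList [c]))) (fun x => x) false
  if ps.length < 5 then none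
  else
    let k := max 5 (PySem.List.pyGetD ps 4 0 + 1)
    if (ps.length == 5 || k ≤ PySem.List.pyGetD ps 5 0) && k < n then some k else none

def find_solution_speed_alt (board : List String × List String × List String) (draw : List String) : Int :=
  let pos := fssPos draw
  (board.1 ++ board.2.1).foldl
    (fun best line =>
      match fssLineK pos line (draw.length : Int) with
      | none => best
      | some k => if best == -1 || k < best then k else best) (-1)

-- ===== PRECONDITION & SPEC =====
def Spec_find_solution_speed (board : List String × List String × List String) (draw : List String) (out : Int) : Prop := out = find_solution_speed_alt board draw
instance (board : List String × List String × List String) (draw : List String) (out : Int) : Decidable (Spec_find_solution_speed board draw out) := by unfold Spec_find_solution_speed; infer_instance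

-- ===== CLAIM (what is proved, stated in full; the proofs are below) =====
def Claim_equal_find_solution_speed : Prop := ∀ (board : List String × List String × List String) (draw : List String), Dom_find_solution_speed board draw → Spec_find_solution_speed board draw (find_solution_speed board draw)

-- ===== LEMMAS AND PROOFS =====

-- proof-side view of B: per line, the (Int-cast) first draw indices of its chars
def fssQs (draw : List String) (L : List Char) : List Int :=
  L.filterMap (fun c => (PySem.List.index? draw (String.ofList [c])).map (fun j => (j : Int)))

-- the per-line winning condition at prefix size k: exactly five marked chars
def fssQual (draw : List String) (L : List Char) (k : Int) : Prop :=
  (fssQs draw L).countP (fun x => decide (x < k)) = 5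

-- ---- the pos dict holds each value's first index ----
lemma fssPos_step (xs : List String) (v : String) : ∀ (s : Int) (d : PySem.Dict String Int),
    ((PySem.List.enumerate xs s).foldl
      (fun d p => if d.contains p.2 then d else d.insert p.2 p.1) d).get? v =
    match d.get? v with
    | some w => some w
    | none => (PySem.List.index? xs v).map (fun j => s + (j : Int)) := by
  induction xs with
  | nil =>
    intro s d
    simp only [PySem.List.enumerate, PySem.List.index?_eq_idxOf?, List.idxOf?_nil]
    cases hg : d.get? v <;> simp [hg]
  | cons x xs ih =>
    intro s d
    rw [PySem.List.enumerate_cons]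
    simp only [List.foldl_cons]
    by_cases hx : d.contains x = true
    · simp only [hx, if_true, ih]
      by_cases hv : v = x
      · subst hv
        have : d.get? v ≠ none := by
          intro hnone
          rw [PySem.Dict.get?_eq_none_iff_contains] at hnone
          simp [hx] at hnone
        cases hg : d.get? v with
        | none => exact absurd hg this
        | some w => simp
      · rw [PySem.List.index?_cons_of_ne _ (Ne.symm hv)]
        cases hg : d.get? v with
        | some w => simp
        | none =>
          cases hj : PySem.List.index? xs v with
          | none => simp
          | some j => simp; omega
    · rw [if_neg (by simp [hx])]
      rw [ih]
      by_cases hv : v = x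
      · subst hv
        rw [PySem.Dict.get?_insert_self d v s]
        have : d.get? v = none := by
          rw [PySem.Dict.get?_eq_none_iff_contains]; simpa using hx
        rw [this, PySem.List.index?_cons_self]
        simp
      · rw [PySem.Dict.get?_insert_of_ne d s hv, PySem.List.index?_cons_of_ne _ (Ne.symm hv)]
        cases hg : d.get? v with
        | some w => simp
        | none =>
          cases hj : PySem.List.index? xs v with
          | none => simp
          | some j => simp; omega

lemma fssPos_get? (draw : List String) (v : String) :
    (fssPos draw).get? v = (PySem.List.index? draw v).map (fun j => (j : Int)) := by
  unfold fssPos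
  rw [fssPos_step]
  rw [PySem.Dict.get?_empty]
  simp

-- ---- membership in a prefix ↔ first index below the bound ----
lemma mem_take_iff_index? (xs : List String) (v : String) (k : Nat) :
    v ∈ xs.take k ↔ ∃ j, PySem.List.index? xs v = some j ∧ j < k := by
  constructor
  · intro hv
    have hvx : v ∈ xs := List.take_subset k xs hv
    have hs : (PySem.List.index? xs v).isSome := by
      rw [PySem.List.index?_isSome_iff]; exact hvx
    obtain ⟨j, hj⟩ := Option.isSome_iff_exists.mp hs
    refine ⟨j, hj, ?_⟩
    obtain ⟨hjlen, hxj, hfirst⟩ := PySem.List.getElem_of_index?_eq_some hj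
    by_contra hk
    have hk' : k ≤ j := by omega
    obtain ⟨i, hi, hvi⟩ := List.mem_iff_getElem.mp hv
    have hilen : i < k := by
      have := hi; simp [List.length_take] at this; omega
    rw [List.getElem_take] at hvi
    exact hfirst i (by omega) hvi
  · rintro ⟨j, hj, hjk⟩
    obtain ⟨hjlen, hxj, _⟩ := PySem.List.getElem_of_index?_eq_some hj
    apply List.mem_iff_getElem.mpr
    refine ⟨j, ?_, ?_⟩
    · simp [List.length_take]; omega
    · rw [List.getElem_take]; exact hxj

-- ---- A's per-line filter count = count of small first indices ----
lemma filter_len_eq_countP (draw : List String) (L : List Char) (i : Nat) :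
    (L.filter (fun c => (draw.take i).contains (String.ofList [c]))).length =
      (fssQs draw L).countP (fun x => decide (x < (i : Int))) := by
  induction L with
  | nil => simp [fssQs]
  | cons c L ih =>
    simp only [fssQs, List.filterMap_cons] at *
    by_cases hm : (draw.take i).contains (String.ofList [c]) = true
    · have hmem : String.ofList [c] ∈ draw.take i := by
        simpa using hm
      obtain ⟨j, hj, hjk⟩ := (mem_take_iff_index? draw _ i).mp hmem
      rw [hj]
      simp only [List.filter_cons, hm, if_true, List.length_cons,
        Option.map_some, List.countP_cons]
      rw [ih]
      simp at ih ⊢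
      rw [List.countP_cons]
      have hd : (decide ((j : Int) < (i : Int))) = true := by simp; omega
      rw [hd]
      simp
    · cases hj : PySem.List.index? draw (String.ofList [c]) with
      | none =>
        simp only [List.filter_cons, hm, if_false, Bool.false_eq_true]
        simpa using ih
      | some j =>
        simp only [List.filter_cons, hm, if_false, Bool.false_eq_true,
          Option.map_some, List.countP_cons]
        rw [ih]
        have hnotmem : String.ofList [c] ∉ draw.take i := by
          simpa using hm
        have hge : ¬ j < i := by
          intro hlt
          exact hnotmem ((mem_take_iff_index? draw _ i).mpr ⟨j, hj, hlt⟩)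
        simp at ih ⊢
        rw [List.countP_cons]
        have hd : (decide ((j : Int) < (i : Int))) = false := by simp; omega
        rw [hd]
        simp

-- ---- counting below a threshold on an ordered list ----
lemma countP_eq_len_takeWhile (p : Int → Bool)
    (hp : ∀ x y : Int, x ≤ y → p y = true → p x = true) :
    ∀ (l : List Int), l.Pairwise (· ≤ ·) →
      l.countP p = (l.takeWhile p).length := by
  intro l hl
  induction l with
  | nil => simp
  | cons x t ih =>
    rw [List.pairwise_cons] at hl
    rw [List.countP_cons, List.takeWhile_cons]
    by_cases hx : p x = true
    · rw [hx]
      simp [ih hl.2]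
    · have hxf : p x = false := by
        cases hpx : p x
        · rfl
        · exact absurd hpx hx
      rw [hxf]
      have h0 : t.countP p = 0 := by
        rw [List.countP_eq_zero]
        intro y hy hpy
        exact hx (hp x y (hl.1 y hy) hpy)
      simp [h0]

lemma len_takeWhile_eq_iff (p : Int → Bool) :
    ∀ (l : List Int) (m : Nat), (l.takeWhile p).length = m ↔
      ((∀ j, (hj : j < m) → ∃ h : j < l.length, p l[j] = true) ∧
       (l.length = m ∨ ∃ h : m < l.length, p l[m] = false)) := by
  intro l
  induction l with
  | nil =>
    intro m
    constructor
    · intro h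
      simp at h
      subst h
      exact ⟨by omega, Or.inl rfl⟩
    · rintro ⟨h1, h2⟩
      rcases h2 with h2 | ⟨h, _⟩
      · simp at h2 ⊢
        omega
      · simp at h
  | cons x t ih =>
    intro m
    rw [List.takeWhile_cons]
    by_cases hx : p x = true
    · rw [if_pos hx]
      cases m with
      | zero =>
        simp only [List.length_cons]
        constructor
        · intro h
          simp at h
        · rintro ⟨h1, h2⟩
          rcases h2 with h2 | ⟨h, hpf⟩
          · simp at h2
          · have hx0 : (x :: t)[0] = x := rfl
            rw [hx0] at hpf
            rw [hx] at hpf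
            simp at hpf
      | succ m' =>
        constructor
        · intro h
          have h' : (t.takeWhile p).length = m' := by simpa using h
          obtain ⟨h1, h2⟩ := (ih m').mp h'
          refine ⟨?_, ?_⟩
          · intro j hj
            cases j with
            | zero => exact ⟨by simp, hx⟩
            | succ j' =>
              obtain ⟨hlt, hpj⟩ := h1 j' (by omega)
              exact ⟨by simp; omega, by simpa using hpj⟩
          · rcases h2 with h2 | ⟨h, hpf⟩
            · left; simp [h2]
            · right; exact ⟨by simp; omega, by simpa using hpf⟩
        · rintro ⟨h1, h2⟩
          have h' : (t.takeWhile p).length = m' := by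
            apply (ih m').mpr
            refine ⟨?_, ?_⟩
            · intro j hj
              obtain ⟨hlt, hpj⟩ := h1 (j+1) (by omega)
              refine ⟨by simp at hlt; omega, by simpa using hpj⟩
            · rcases h2 with h2 | ⟨h, hpf⟩
              · left; simp at h2; omega
              · right
                refine ⟨by simp at h; omega, by simpa using hpf⟩
          simp [h']
    · have hxf : p x = false := by
        cases hpx : p x
        · rfl
        · exact absurd hpx hx
      rw [if_neg hx]
      constructor
      · intro h
        simp at h
        subst h
        exact ⟨by omega, Or.inr ⟨by simp, by simpa using hxf⟩⟩
      · rintro ⟨h1, h2⟩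
        cases m with
        | zero => simp
        | succ m' =>
          obtain ⟨hlt, hp0⟩ := h1 0 (by omega)
          have : (x :: t)[0] = x := rfl
          rw [this] at hp0
          exact absurd hp0 hx

-- the qualifying condition through the sorted position list
lemma qual_via_ps (draw : List String) (L : List Char) (k : Int)
    (ps : List Int) (hperm : ps.Perm (fssQs draw L)) (hpw : ps.Pairwise (· ≤ ·)) :
    fssQual draw L k ↔ (ps.takeWhile (fun x => decide (x < k))).length = 5 := by
  unfold fssQual
  rw [← hperm.countP_eq]
  rw [countP_eq_len_takeWhile _ ?_ ps hpw]
  intro x y hxy hy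
  simp at hy ⊢
  omega

-- ---- per-line characterisation of B's candidate ----
lemma lineK_ge5 (pos : PySem.Dict String Int) (line : String) (n k : Int)
    (h : fssLineK pos line n = some k) : 5 ≤ k := by
  simp only [fssLineK] at h
  split_ifs at h with h1 h2
  have hk := Option.some.inj h
  omega

lemma lineK_some (draw : List String) (line : String) (k : Int)
    (h : fssLineK (fssPos draw) line (draw.length : Int) = some k) :
    5 ≤ k ∧ k < (draw.length : Int) ∧ fssQual draw line.toList k ∧
      ∀ j : Int, 5 ≤ j → j < k → ¬ fssQual draw line.toList j := by
  simp only [fssLineK] at h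
  have hqs : line.toList.filterMap (fun c => (fssPos draw).get? (String.ofList [c])) =
      fssQs draw line.toList := by
    simp only [fssQs, fssPos_get?]
  rw [hqs] at h
  set ps := PySem.List.sorted (fssQs draw line.toList) (fun x => x) false with hps
  have hperm : ps.Perm (fssQs draw line.toList) := PySem.List.sorted_perm _ _ _
  have hpw : ps.Pairwise (· ≤ ·) := PySem.List.sorted_pairwise _ (fun x => x)
  split_ifs at h with h1 h2
  have hk := Option.some.inj h
  have hlen : 4 < ps.length := by omega
  have hget4 : PySem.List.pyGetD ps 4 0 = ps[4] := PySem.List.pyGetD_ofNat ps 4 0 hlen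
  rw [hget4] at hk h2
  simp only [Bool.and_eq_true, Bool.or_eq_true, beq_iff_eq, decide_eq_true_eq] at h2
  obtain ⟨h2a, h2b⟩ := h2
  have hmono := List.pairwise_iff_getElem.mp hpw
  refine ⟨by omega, by omega, ?_, ?_⟩
  · rw [qual_via_ps draw line.toList k ps hperm hpw]
    rw [len_takeWhile_eq_iff]
    refine ⟨?_, ?_⟩
    · intro j hj
      refine ⟨by omega, ?_⟩
      have : ps[j] ≤ ps[4] := by
        rcases Nat.lt_or_ge j 4 with hj4 | hj4
        · exact hmono j 4 (by omega) (by omega) hj4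
        · have : j = 4 := by omega
          subst this; exact le_refl _
      simp
      omega
    · rcases h2a with h2a | h2a
      · left; exact h2a
      · rcases Nat.lt_or_ge 5 ps.length with h5len | h5len
        · right
          refine ⟨h5len, ?_⟩
          have hget5 : PySem.List.pyGetD ps 5 0 = ps[5] :=
            PySem.List.pyGetD_ofNat ps 5 0 h5len
          rw [hget5] at h2a
          simp
          omega
        · left; omega
  · intro j hj5 hjk hq
    rw [qual_via_ps draw line.toList j ps hperm hpw] at hq
    rw [len_takeWhile_eq_iff] at hq
    obtain ⟨hq1, -⟩ := hq
    obtain ⟨hlt4, hp4⟩ := hq1 4 (by omega)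
    simp at hp4
    omega

lemma lineK_none (draw : List String) (line : String)
    (h : fssLineK (fssPos draw) line (draw.length : Int) = none) :
    ∀ j : Int, 5 ≤ j → j < (draw.length : Int) → ¬ fssQual draw line.toList j := by
  simp only [fssLineK] at h
  have hqs : line.toList.filterMap (fun c => (fssPos draw).get? (String.ofList [c])) =
      fssQs draw line.toList := by
    simp only [fssQs, fssPos_get?]
  rw [hqs] at h
  set ps := PySem.List.sorted (fssQs draw line.toList) (fun x => x) false with hps
  have hperm : ps.Perm (fssQs draw line.toList) := PySem.List.sorted_perm _ _ _
  have hpw : ps.Pairwise (· ≤ ·) := PySem.List.sorted_pairwise _ (fun x => x)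
  intro j hj5 hjn hq
  rw [qual_via_ps draw line.toList j ps hperm hpw] at hq
  rw [len_takeWhile_eq_iff] at hq
  obtain ⟨hq1, hq2⟩ := hq
  split_ifs at h with h1 h2
  · -- fewer than five chars ever drawn: no step can mark five
    obtain ⟨hlt, -⟩ := hq1 4 (by omega)
    omega
  · -- the five-count interval is missed or starts past the end
    have hlen : 4 < ps.length := by omega
    obtain ⟨hlt4, hp4⟩ := hq1 4 (by omega)
    simp at hp4
    have hget4 : PySem.List.pyGetD ps 4 0 = ps[4] := PySem.List.pyGetD_ofNat ps 4 0 hlen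
    rw [hget4] at h2
    simp only [Bool.and_eq_true, Bool.or_eq_true, beq_iff_eq, decide_eq_true_eq, not_and_or] at h2
    rcases h2 with h2 | h2
    · push_neg at h2
      obtain ⟨h2a, h2b⟩ := h2
      rcases hq2 with hq2 | ⟨h5len, hp5⟩
      · exact h2a hq2
      · have hget5 : PySem.List.pyGetD ps 5 0 = ps[5] :=
          PySem.List.pyGetD_ofNat ps 5 0 h5len
        rw [hget5] at h2b
        simp at hp5
        omega
    · push_neg at h2
      omega

-- ---- A's check ↔ some line qualifies ----
lemma chk_iff (b0 b1 : List String) (draw : List String) (i : Nat) :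
    (fssCheck b0 (draw.take i) || fssCheck b1 (draw.take i)) = true ↔
      ∃ L ∈ b0 ++ b1, fssQual draw L.toList (i : Int) := by
  unfold fssCheck
  rw [← List.any_append, List.any_eq_true]
  constructor
  · rintro ⟨L, hL, hp⟩
    refine ⟨L, hL, ?_⟩
    simp only [beq_iff_eq] at hp
    unfold fssQual
    rw [← filter_len_eq_countP]
    exact hp
  · rintro ⟨L, hL, hp⟩
    refine ⟨L, hL, ?_⟩
    simp only [beq_iff_eq]
    rw [filter_len_eq_countP]
    exact hp

-- ---- A's loop finds the first qualifying step ----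
lemma fssLoop_eq_find (b0 b1 draw : List String) : ∀ (i : Nat),
    fssLoop b0 b1 draw (draw.take i) i =
      match (List.range' i (draw.length - i)).find?
          (fun k => fssCheck b0 (draw.take k) || fssCheck b1 (draw.take k)) with
      | some k => (k : Int)
      | none => -1 := by
  suffices H : ∀ (n i : Nat), draw.length - i = n →
      fssLoop b0 b1 draw (draw.take i) i =
        match (List.range' i (draw.length - i)).find?
            (fun k => fssCheck b0 (draw.take k) || fssCheck b1 (draw.take k)) with
        | some k => (k : Int)
        | none => -1 by
    intro i; exact H _ i rfl
  intro n
  induction n with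
  | zero =>
    intro i h0
    have hni : ¬ i < draw.length := by omega
    rw [fssLoop, if_neg hni, h0]
    simp
  | succ n ih =>
    intro i h
    have hi : i < draw.length := by omega
    rw [fssLoop, if_pos hi]
    have hrange : List.range' i (draw.length - i) =
        i :: List.range' (i+1) (draw.length - (i+1)) := by
      have hsplit : draw.length - i = (draw.length - (i+1)) + 1 := by omega
      rw [hsplit, List.range'_succ]
    rw [hrange]
    by_cases hc0 : fssCheck b0 (draw.take i) = true
    · rw [if_pos hc0]
      rw [List.find?_cons_of_pos (by simp [hc0])]
      simp [List.length_take]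
      omega
    · rw [if_neg hc0]
      by_cases hc1 : fssCheck b1 (draw.take i) = true
      · rw [if_pos hc1]
        rw [List.find?_cons_of_pos (by simp [hc0, hc1])]
        simp [List.length_take]
        omega
      · rw [if_neg hc1]
        rw [List.find?_cons_of_neg (by simp [hc0, hc1])]
        have htake : draw.take i ++ [draw.getD i ""] = draw.take (i+1) := by
          rw [List.take_succ]
          congr 1
          rw [List.getElem?_eq_getElem hi]
          simp [List.getD, List.getElem?_eq_getElem hi]
        rw [htake]
        exact ih (i+1) (by omega)

lemma find?_range'_some {p : Nat → Bool} : ∀ {m a k : Nat},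
    (List.range' a m).find? p = some k →
    a ≤ k ∧ k < a + m ∧ p k = true ∧ ∀ j, a ≤ j → j < k → p j = false := by
  intro m
  induction m with
  | zero => intro a k h; simp at h
  | succ m ih =>
    intro a k h
    rw [List.range'_succ] at h
    by_cases hpa : p a = true
    · rw [List.find?_cons_of_pos hpa] at h
      have hk := Option.some.inj h
      subst hk
      exact ⟨le_refl a, by omega, hpa, fun j h1 h2 => by omega⟩
    · rw [List.find?_cons_of_neg (by simpa using hpa)] at h
      obtain ⟨h1, h2, h3, h4⟩ := ih h
      refine ⟨by omega, by omega, h3, ?_⟩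
      intro j hj1 hj2
      by_cases hja : j = a
      · subst hja
        exact Bool.eq_false_iff.mpr hpa
      · exact h4 j (by omega) hj2

-- ---- B's fold takes the minimum candidate ----
def fssFold (pos : PySem.Dict String Int) (n : Int) (b : Int) (lines : List String) : Int :=
  lines.foldl (fun best line =>
      match fssLineK pos line n with
      | none => best
      | some k => if best == -1 || k < best then k else best) b

lemma fold_char (pos : PySem.Dict String Int) (n : Int) :
    ∀ (lines : List String) (b : Int), (b = -1 ∨ 5 ≤ b) →
     ((fssFold pos n b lines = -1 ∨ 5 ≤ fssFold pos n b lines) ∧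
     (∀ L ∈ lines, ∀ v, fssLineK pos L n = some v →
        fssFold pos n b lines ≤ v ∧ fssFold pos n b lines ≠ -1) ∧
     (b ≠ -1 → fssFold pos n b lines ≤ b ∧ fssFold pos n b lines ≠ -1) ∧
     (fssFold pos n b lines ≠ b → ∃ L ∈ lines, fssLineK pos L n = some (fssFold pos n b lines))) := by
  intro lines
  induction lines with
  | nil =>
    intro b hb
    refine ⟨hb, by simp, fun h => ⟨le_refl b, h⟩, fun h => absurd rfl h⟩
  | cons L ls ih =>
    intro b hb
    show ((fssFold pos n _ ls = -1 ∨ _) ∧ _)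
    cases hK : fssLineK pos L n with
    | none =>
      simp only [fssFold, List.foldl_cons, hK]
      obtain ⟨c1, c2, c3, c4⟩ := ih b hb
      simp only [fssFold] at c1 c2 c3 c4
      refine ⟨c1, ?_, c3, ?_⟩
      · intro L' hL' v hv
        rcases List.mem_cons.mp hL' with rfl | h'
        · rw [hK] at hv; cases hv
        · exact c2 L' h' v hv
      · intro hr
        obtain ⟨L', hL', hv⟩ := c4 hr
        exact ⟨L', List.mem_cons_of_mem _ hL', hv⟩
    | some k =>
      have hk5 : 5 ≤ k := lineK_ge5 pos L n k hK
      simp only [fssFold, List.foldl_cons, hK]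
      set b' := if b == -1 || decide (k < b) then k else b with hb'
      have hb'5 : 5 ≤ b' := by
        rw [hb']
        split_ifs with hcond
        · exact hk5
        · simp only [Bool.or_eq_true, beq_iff_eq, decide_eq_true_eq, not_or] at hcond
          rcases hb with hb | hb
          · exact absurd hb hcond.1
          · exact hb
      have hb'le : b' ≤ k ∧ (b ≠ -1 → b' ≤ b) := by
        rw [hb']
        split_ifs with hcond
        · simp only [Bool.or_eq_true, beq_iff_eq, decide_eq_true_eq] at hcond
          refine ⟨le_refl k, fun hbne => ?_⟩
          rcases hcond with hcond | hcond
          · exact absurd hcond hbne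
          · omega
        · simp only [Bool.or_eq_true, beq_iff_eq, decide_eq_true_eq, not_or] at hcond
          exact ⟨by omega, fun _ => le_refl b⟩
      obtain ⟨c1, c2, c3, c4⟩ := ih b' (Or.inr hb'5)
      simp only [fssFold] at c1 c2 c3 c4
      have hrb' := c3 (by omega)
      refine ⟨c1, ?_, ?_, ?_⟩
      · intro L' hL' v hv
        rcases List.mem_cons.mp hL' with rfl | h'
        · rw [hK] at hv
          have hvk : v = k := (Option.some.inj hv).symm
          subst hvk
          exact ⟨le_trans hrb'.1 hb'le.1, hrb'.2⟩
        · exact c2 L' h' v hv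
      · intro hbne
        exact ⟨le_trans hrb'.1 (hb'le.2 hbne), hrb'.2⟩
      · intro hrb
        by_cases hr : ls.foldl (fun best line =>
            match fssLineK pos line n with
            | none => best
            | some k => if best == -1 || k < best then k else best) b' = b'
        · have hbk : b' = k ∨ b' = b := by
            rw [hb']; split_ifs
            · exact Or.inl rfl
            · exact Or.inr rfl
          rcases hbk with h | h
          · refine ⟨L, List.mem_cons_self, ?_⟩
            rw [hK, hr, h]
          · rw [hr, h] at hrb
            exact absurd rfl hrb
        · obtain ⟨L', hL', hv⟩ := c4 hr
          exact ⟨L', List.mem_cons_of_mem _ hL', hv⟩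

-- ===== VERDICT (by name: the statement is the Claim_ definition above) =====
theorem find_solution_speed_spec : Claim_equal_find_solution_speed := by
  intro board draw _hdom
  unfold Spec_find_solution_speed
  obtain ⟨b0, b1, b2⟩ := board
  have hslice : PySem.List.slice draw (some 0) (some 5) = draw.take 5 := by
    rw [PySem.List.slice_zero_start, PySem.List.slice_to draw (by norm_num)]
    rfl
  have hA : find_solution_speed (b0, b1, b2) draw =
      match (List.range' 5 (draw.length - 5)).find?
          (fun k => fssCheck b0 (draw.take k) || fssCheck b1 (draw.take k)) with
      | some k => (k : Int)
      | none => -1 := by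
    show fssLoop b0 b1 draw (PySem.List.slice draw (some 0) (some 5)) 5 = _
    rw [hslice]
    exact fssLoop_eq_find b0 b1 draw 5
  have hB : find_solution_speed_alt (b0, b1, b2) draw =
      fssFold (fssPos draw) (draw.length : Int) (-1) (b0 ++ b1) := rfl
  obtain ⟨c1, c2, c3, c4⟩ :=
    fold_char (fssPos draw) (draw.length : Int) (b0 ++ b1) (-1) (Or.inl rfl)
  rw [hA, hB]
  set r := fssFold (fssPos draw) (draw.length : Int) (-1) (b0 ++ b1) with hr
  cases hfind : (List.range' 5 (draw.length - 5)).find?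
      (fun k => fssCheck b0 (draw.take k) || fssCheck b1 (draw.take k)) with
  | none =>
    show (-1 : Int) = r
    by_contra hne
    have hrne : r ≠ -1 := fun h => hne h.symm
    obtain ⟨L, hL, hv⟩ := c4 hrne
    obtain ⟨h5, hlt, hq, -⟩ := lineK_some draw L r hv
    have hnat : ((r.toNat : Nat) : Int) = r := Int.toNat_of_nonneg (by omega)
    have hmem : r.toNat ∈ List.range' 5 (draw.length - 5) := by
      rw [List.mem_range'_1]
      omega
    have hchkf := List.find?_eq_none.mp hfind _ hmem
    apply hchkf
    rw [chk_iff]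
    exact ⟨L, hL, by rw [hnat]; exact hq⟩
  | some k =>
    obtain ⟨hk5, hkm, hpk, hmin⟩ := find?_range'_some hfind
    obtain ⟨L0, hL0, hq0⟩ := (chk_iff b0 b1 draw k).mp hpk
    have hklen : k < draw.length := by omega
    cases hv0 : fssLineK (fssPos draw) L0 (draw.length : Int) with
    | none =>
      exact absurd hq0 (lineK_none draw L0 hv0 (k : Int) (by omega) (by omega))
    | some v =>
      obtain ⟨hv5, hvlt, hvq, hvmin⟩ := lineK_some draw L0 v hv0
      have hvk : v ≤ (k : Int) := by
        by_contra hgt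
        exact hvmin (k : Int) (by omega) (by omega) hq0
      obtain ⟨hrv, hrne⟩ := c2 L0 hL0 v hv0
      obtain ⟨Lr, hLr, hvr⟩ := c4 hrne
      obtain ⟨hr5, hrlt, hrq, -⟩ := lineK_some draw Lr r hvr
      have hkr : (k : Int) ≤ r := by
        by_contra hlt2
        have hnat : ((r.toNat : Nat) : Int) = r := Int.toNat_of_nonneg (by omega)
        have hfalse := hmin r.toNat (by omega) (by omega)
        have hex : ∃ L ∈ b0 ++ b1, fssQual draw L.toList ((r.toNat : Nat) : Int) :=
          ⟨Lr, hLr, by rw [hnat]; exact hrq⟩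
        rw [← chk_iff] at hex
        rw [hfalse] at hex
        cases hex
      show (k : Int) = r
      omega
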